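-- pv_equiv track=rewrite | github.com/stanX19/genshin_lyre | test11/test11.py | format_sectioned_score
-- ===== SOURCE A (Python) =====
-- def format_sectioned_score(score:str,sep="--"):
--     sectioned_score = score.replace("\n","").replace(" ",'-').split("/")
--     new_score = ""
--     for idx, section in enumerate(sectioned_score):
--         section_bucket = []
--         bucket = ""
--         for key in section:
--             if bucket:
--                 bucket+=key
--                 if key == ")":
--                     section_bucket.append(bucket)
--                     bucket = ""
--             elif key == "(":
--                 bucket+=key
--             elif key == "-":
--                 section_bucket.append('')
--             else:
--                 section_bucket.append(key)
--         if len(section_bucket) <= 4: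
--             section_bucket += [''] * (5 - len(section_bucket))
--         else:
--             section_bucket += [''] * (9 - len(section_bucket))
--             # 9 instead of 8 because we are using .join() later, will need an extra character
--
--         cur_sec_score = sep.join(section_bucket)
--         if idx % 2 == 1 and cur_sec_score[-1] == "-":
--                 new_score += cur_sec_score[:-1] + "\n"
--         else:
--             new_score += cur_sec_score
--     return new_score
-- ===== SOURCE B (Python) =====
-- import re
--
-- # Ordered alternation: closed group first, then unclosed trailing group, then '-', then any char.
-- _TOKEN = re.compile(r'\([^)]*\)|\(.*|-|.')
--
-- def format_sectioned_score(score: str, sep="--"):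
--     parts = []
--     for idx, section in enumerate(score.replace("\n", "").replace(" ", '-').split("/")):
--         entries = []
--         for tok in _TOKEN.findall(section):
--             if tok == "-":
--                 entries.append('')
--             elif tok[0] == "(" and tok[-1] == ")" and len(tok) >= 2:
--                 entries.append(tok)          # closed (...) group, kept verbatim
--             elif tok[0] == "(":
--                 pass                         # unclosed trailing group: dropped
--             else:
--                 entries.append(tok)          # any other single character
--         entries += [''] * ((5 if len(entries) <= 4 else 9) - len(entries))
--         cur = sep.join(entries)
--         if idx % 2 == 1 and cur[-1] == "-":
--             parts.append(cur[:-1] + "\n")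
--         else:
--             parts.append(cur)
--     return "".join(parts)
-- ===== Notes on version B (the rewrite author's own statement) =====
-- stated objective: idiomatic
-- what changed: The character-by-character bucket state machine is replaced by a regex tokenizer (re.findall with an ordered alternation: closed parenthesis group, unclosed trailing group, dash, any single character) plus a per-token classification, and the output is assembled from a list of per-section strings joined once instead of a running string accumulator.
import Mathlib
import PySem

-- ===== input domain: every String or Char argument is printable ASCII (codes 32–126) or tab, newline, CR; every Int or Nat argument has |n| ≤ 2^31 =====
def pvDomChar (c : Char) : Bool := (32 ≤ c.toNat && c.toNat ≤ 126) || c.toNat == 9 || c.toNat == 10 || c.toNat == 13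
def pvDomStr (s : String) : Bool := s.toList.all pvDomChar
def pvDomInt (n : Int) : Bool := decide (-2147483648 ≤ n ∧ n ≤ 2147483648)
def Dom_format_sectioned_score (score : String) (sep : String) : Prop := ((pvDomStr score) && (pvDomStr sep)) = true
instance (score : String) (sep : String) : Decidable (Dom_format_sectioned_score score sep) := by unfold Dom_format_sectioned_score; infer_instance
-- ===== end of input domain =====

-- B replaces A's character-by-character bucket state machine with a regex-style tokenizer
-- (closed group, unclosed trailing group, dash, or any single character) and assembles the output per
-- section with a map+join instead of A's running string accumulator (objective: idiomatic).

-- ===== PORT A =====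
-- inner loop state: (section_bucket, bucket)
def pvStepA (st : List (List Char) × List Char) (key : Char) : List (List Char) × List Char :=
  if st.2 ≠ [] then
    let b' := st.2 ++ [key]
    if key = ')' then (st.1 ++ [b'], []) else (st.1, b')
  else if key = '(' then (st.1, st.2 ++ ['('])
  else if key = '-' then (st.1 ++ [[]], st.2)
  else (st.1 ++ [[key]], st.2)

def format_sectioned_score (score : String) (sep : String) : String :=
  let sectioned_score :=
    PySem.Chars.splitOn
      (PySem.Chars.replace (PySem.Chars.replace score.toList ['\n'] []) [' '] ['-']) ['/']
  String.mk ((PySem.List.enumerate sectioned_score 0).foldl (fun new_score p =>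
    let section_bucket := (p.2.foldl pvStepA ([], [])).1
    let padded :=
      if section_bucket.length ≤ 4 then
        section_bucket ++ List.replicate (5 - section_bucket.length) []
      else
        section_bucket ++ List.replicate (9 - section_bucket.length) []
    let cur_sec_score := PySem.Chars.join sep.toList padded
    -- cur_sec_score[-1] : pyGet? (none on the empty string, where Python raises — excluded by Pre_)
    if p.1 % 2 = 1 ∧ PySem.List.pyGet? cur_sec_score (-1) = some '-' then
      new_score ++ (PySem.List.slice cur_sec_score none (some (-1)) ++ ['\n'])
    else
      new_score ++ cur_sec_score) [])

-- ===== PORT B =====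
-- the regex's group-interior predicate: 'not a closing paren'
def pvNotRp (c : Char) : Bool := c ≠ ')'

-- Hand port of re.findall(r'\([^)]*\)|\(.*|-|.', s): ordered alternation scanned left to right;
-- exact for this pattern ('\n' never occurs: it was removed before splitting).
def pvFindall : List Char → List (List Char)
  | [] => []
  | c :: r =>
    if c = '(' then
      let v := r.dropWhile pvNotRp
      if v = [] then [c :: r]                                      -- '\(.*' : unclosed, eats the rest
      else (c :: (r.takeWhile pvNotRp ++ [')'])) :: pvFindall v.tail  -- '\([^)]*\)'
    else [c] :: pvFindall r                                        -- '-' or '.' : one char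
termination_by cs => cs.length
decreasing_by
  · have h1 := List.length_dropWhile_le pvNotRp r
    simp only [List.length_tail, List.length_cons]
    omega
  · simp

-- token classification loop of B ('-' → '', closed group kept, unclosed dropped, else the char)
def pvEntriesB (sec : List Char) : List (List Char) :=
  (pvFindall sec).foldl (fun entries tok =>
    if tok = ['-'] then entries ++ [[]]
    else if PySem.List.pyGet? tok 0 = some '(' ∧ PySem.List.pyGet? tok (-1) = some ')' ∧ 2 ≤ tok.length then
      entries ++ [tok]
    else if PySem.List.pyGet? tok 0 = some '(' then entries
    else entries ++ [tok]) []

def pvSectionB (sep : List Char) (p : Int × List Char) : List Char :=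
  let entries := pvEntriesB p.2
  let padded := entries ++ List.replicate ((if entries.length ≤ 4 then 5 else 9) - entries.length) []
  let cur := PySem.Chars.join sep padded
  if p.1 % 2 = 1 ∧ PySem.List.pyGet? cur (-1) = some '-' then
    PySem.List.slice cur none (some (-1)) ++ ['\n']
  else cur

def format_sectioned_score_alt (score : String) (sep : String) : String :=
  let sections :=
    PySem.Chars.splitOn
      (PySem.Chars.replace (PySem.Chars.replace score.toList ['\n'] []) [' '] ['-']) ['/']
  String.mk (((PySem.List.enumerate sections 0).map (pvSectionB sep.toList)).flatten)

-- ===== PRECONDITION & SPEC =====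
-- a section whose joined entries are empty: only '-'s, optionally followed by an unclosed '(' group
def pvEmptyish : List Char → Bool
  | [] => true
  | c :: r => if c = '-' then pvEmptyish r else if c = '(' then !(r.contains ')') else false

-- Pre_ excludes exactly the inputs on which Python A raises IndexError (and B raises it too):
-- an empty separator together with some odd-indexed section all of whose entries are empty, so that
-- cur_sec_score[-1] indexes an empty string.
def Pre_format_sectioned_score (score : String) (sep : String) : Prop :=
  sep ≠ "" ∨
    ((PySem.Chars.splitOn
        (PySem.Chars.replace (PySem.Chars.replace score.toList ['\n'] []) [' '] ['-']) ['/']).zipIdx.all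
      (fun p => p.2 % 2 == 0 || !pvEmptyish p.1)) = true
instance (score : String) (sep : String) : Decidable (Pre_format_sectioned_score score sep) := by
  unfold Pre_format_sectioned_score; infer_instance

def pvWitness_format_sectioned_score : String × String := ("x y/(ab)c", "--")

def Spec_format_sectioned_score (score : String) (sep : String) (out : String) : Prop := out = format_sectioned_score_alt score sep
instance (score : String) (sep : String) (out : String) : Decidable (Spec_format_sectioned_score score sep out) := by unfold Spec_format_sectioned_score; infer_instance

-- ===== CLAIM (what is proved, stated in full; the proofs are below) =====
def Claim_equal_format_sectioned_score : Prop := ∀ (score : String) (sep : String), Dom_format_sectioned_score score sep → Pre_format_sectioned_score score sep → Spec_format_sectioned_score score sep (format_sectioned_score score sep)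

-- ===== LEMMAS AND PROOFS =====

-- what B keeps of one token
def pvClass (tok : List Char) : List (List Char) :=
  if tok = ['-'] then [[]]
  else if PySem.List.pyGet? tok 0 = some '(' ∧ PySem.List.pyGet? tok (-1) = some ')' ∧ 2 ≤ tok.length then [tok]
  else if PySem.List.pyGet? tok 0 = some '(' then []
  else [tok]

theorem pvEntriesB_eq_flatMap (cs : List Char) :
    pvEntriesB cs = (pvFindall cs).flatMap pvClass := by
  unfold pvEntriesB
  have h : (pvFindall cs).foldl (fun entries tok =>
      if tok = ['-'] then entries ++ [[]]
      else if PySem.List.pyGet? tok 0 = some '(' ∧ PySem.List.pyGet? tok (-1) = some ')' ∧ 2 ≤ tok.length then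
        entries ++ [tok]
      else if PySem.List.pyGet? tok 0 = some '(' then entries
      else entries ++ [tok]) []
      = (pvFindall cs).foldl (fun entries tok => entries ++ pvClass tok) [] := by
    apply PySem.List.foldl_congr_mem
    intro a tok _
    unfold pvClass
    split_ifs <;> simp
  rw [h, PySem.List.foldl_append_eq_flatMap]
  simp

-- A's inner loop while the bucket is open
theorem pvStepA_open (cs : List Char) : ∀ (sb : List (List Char)) (b : List Char), b ≠ [] →
    cs.foldl pvStepA (sb, b) =
      if (cs.dropWhile pvNotRp) = [] then (sb, b ++ cs)
      else List.foldl pvStepA (sb ++ [b ++ cs.takeWhile pvNotRp ++ [')']], [])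
            (cs.dropWhile pvNotRp).tail := by
  induction cs with
  | nil => intro sb b hb; simp
  | cons c r ih =>
    intro sb b hb
    by_cases hc : c = ')'
    · subst hc
      simp [List.foldl_cons, pvStepA, pvNotRp, hb]
    · have h1 : List.dropWhile pvNotRp (c :: r) = List.dropWhile pvNotRp r := by
        rw [List.dropWhile_cons, if_pos (by simp [pvNotRp, hc])]
      have h2 : List.takeWhile pvNotRp (c :: r) = c :: List.takeWhile pvNotRp r := by
        rw [List.takeWhile_cons, if_pos (by simp [pvNotRp, hc])]
      rw [List.foldl_cons]
      have hstep : pvStepA (sb, b) c = (sb, b ++ [c]) := by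
        simp [pvStepA, hb, hc]
      rw [hstep, ih sb (b ++ [c]) (by simp), h1, h2]
      split_ifs <;> simp

theorem pvFindall_unclosed {r : List Char} (h : List.dropWhile pvNotRp r = []) :
    pvClass ('(' :: r) = [] := by
  have hall : ∀ x ∈ r, x ≠ ')' := by
    intro x hx
    have := List.dropWhile_eq_nil_iff.mp h x hx
    simpa [pvNotRp] using this
  have hlast : PySem.List.pyGet? ('(' :: r) (-1) ≠ some ')' := by
    rw [PySem.List.pyGet?_neg_one, List.getLast?_cons]
    cases hr : r.getLast? with
    | none => simp
    | some x =>
      have hx : x ∈ r := List.mem_of_getLast? hr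
      simpa using hall x hx
  have hne : ('(' :: r) ≠ ['-'] := by
    have : ('(' : Char) ≠ '-' := by decide
    simp [this]
  have h0 : PySem.List.pyGet? ('(' :: r) 0 = some '(' := PySem.List.pyGet?_zero_cons '(' r
  unfold pvClass
  rw [if_neg hne, if_neg (fun hc => hlast hc.2.1), if_pos h0]

-- main inner-loop equivalence: A's state machine produces exactly B's kept tokens
theorem pvInner_eq (n : Nat) : ∀ (cs : List Char), cs.length ≤ n → ∀ (sb : List (List Char)),
    (cs.foldl pvStepA (sb, [])).1 = sb ++ (pvFindall cs).flatMap pvClass := by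
  induction n with
  | zero =>
    intro cs hcs sb
    have : cs = [] := List.eq_nil_of_length_eq_zero (Nat.le_zero.mp hcs)
    subst this; simp [pvFindall]
  | succ n ih =>
    intro cs hcs sb
    cases cs with
    | nil => simp [pvFindall]
    | cons c r =>
      by_cases hp : c = '('
      · subst hp
        rw [List.foldl_cons]
        have hstep : pvStepA (sb, []) '(' = (sb, ['(']) := by simp [pvStepA]
        rw [hstep, pvStepA_open r sb ['('] (by simp)]
        by_cases hv : List.dropWhile pvNotRp r = []
        · rw [if_pos hv]
          have hf : pvFindall ('(' :: r) = ['(' :: r] := by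
            rw [pvFindall]; simp [hv]
          rw [hf]
          simp [pvFindall_unclosed hv]
        · rw [if_neg hv]
          have hlen : (List.dropWhile pvNotRp r).tail.length ≤ n := by
            have h1 := List.length_dropWhile_le pvNotRp r
            have h2 : (List.dropWhile pvNotRp r).tail.length ≤ (List.dropWhile pvNotRp r).length := by
              simp [List.length_tail]
            simp only [List.length_cons] at hcs
            omega
          rw [ih _ hlen]
          have hf : pvFindall ('(' :: r) =
              ('(' :: (List.takeWhile pvNotRp r ++ [')'])) ::
                pvFindall (List.dropWhile pvNotRp r).tail := by
            rw [pvFindall]; simp [hv]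
          rw [hf]
          have hclass : pvClass ('(' :: (List.takeWhile pvNotRp r ++ [')'])) =
              [('(' :: (List.takeWhile pvNotRp r ++ [')']))] := by
            unfold pvClass
            have hne : ('(' :: (List.takeWhile pvNotRp r ++ [')'])) ≠ ['-'] := by
              intro hcon
              have := congrArg (List.head?) hcon
              simp at this
            rw [if_neg hne, if_pos]
            refine ⟨PySem.List.pyGet?_zero_cons _ _, ?_, by simp⟩
            rw [PySem.List.pyGet?_neg_one, List.getLast?_cons]
            simp [List.getLast?_append]
          simp [hclass]
      · rw [List.foldl_cons]
        by_cases hm : c = '-'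
        · subst hm
          have hstep : pvStepA (sb, []) '-' = (sb ++ [[]], []) := by simp [pvStepA]
          rw [hstep, ih r (by simp only [List.length_cons] at hcs; omega)]
          rw [pvFindall]
          simp only [if_neg hp]
          have : pvClass ['-'] = [[]] := by decide
          simp [this]
        · have hstep : pvStepA (sb, []) c = (sb ++ [[c]], []) := by
            simp [pvStepA, hp, hm]
          rw [hstep, ih r (by simp only [List.length_cons] at hcs; omega)]
          rw [pvFindall]
          simp only [if_neg hp]
          have hclass : pvClass [c] = [[c]] := by
            unfold pvClass
            rw [if_neg (by simp [hm]),
                if_neg (by rw [PySem.List.pyGet?_zero_cons]; simp [hp]),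
                if_neg (by rw [PySem.List.pyGet?_zero_cons]; simp [hp])]
          simp [hclass]

theorem pvBody_eq (sep : List Char) (acc : List Char) (p : Int × List Char) :
    (let section_bucket := (p.2.foldl pvStepA ([], [])).1
     let padded :=
       if section_bucket.length ≤ 4 then
         section_bucket ++ List.replicate (5 - section_bucket.length) []
       else
         section_bucket ++ List.replicate (9 - section_bucket.length) []
     let cur_sec_score := PySem.Chars.join sep padded
     if p.1 % 2 = 1 ∧ PySem.List.pyGet? cur_sec_score (-1) = some '-' then
       acc ++ (PySem.List.slice cur_sec_score none (some (-1)) ++ ['\n'])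
     else acc ++ cur_sec_score) = acc ++ pvSectionB sep p := by
  have hb : (p.2.foldl pvStepA ([], [])).1 = pvEntriesB p.2 := by
    rw [pvInner_eq p.2.length p.2 le_rfl [], pvEntriesB_eq_flatMap]
    simp
  unfold pvSectionB
  simp only [hb]
  have hpad : (if (pvEntriesB p.2).length ≤ 4 then
        pvEntriesB p.2 ++ List.replicate (5 - (pvEntriesB p.2).length) []
      else pvEntriesB p.2 ++ List.replicate (9 - (pvEntriesB p.2).length) [])
      = pvEntriesB p.2 ++ List.replicate ((if (pvEntriesB p.2).length ≤ 4 then 5 else 9) - (pvEntriesB p.2).length) [] := by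
    split_ifs <;> rfl
  rw [hpad]
  split_ifs <;> rfl

theorem pvOuter_eq (sep : List Char) (l : List (Int × List Char)) :
    l.foldl (fun new_score p =>
      let section_bucket := (p.2.foldl pvStepA ([], [])).1
      let padded :=
        if section_bucket.length ≤ 4 then
          section_bucket ++ List.replicate (5 - section_bucket.length) []
        else
          section_bucket ++ List.replicate (9 - section_bucket.length) []
      let cur_sec_score := PySem.Chars.join sep padded
      if p.1 % 2 = 1 ∧ PySem.List.pyGet? cur_sec_score (-1) = some '-' then
        new_score ++ (PySem.List.slice cur_sec_score none (some (-1)) ++ ['\n'])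
      else new_score ++ cur_sec_score) [] = (l.map (pvSectionB sep)).flatten := by
  have h1 := PySem.List.foldl_congr_mem l
    (fun new_score p =>
      let section_bucket := (p.2.foldl pvStepA ([], [])).1
      let padded :=
        if section_bucket.length ≤ 4 then
          section_bucket ++ List.replicate (5 - section_bucket.length) []
        else
          section_bucket ++ List.replicate (9 - section_bucket.length) []
      let cur_sec_score := PySem.Chars.join sep padded
      if p.1 % 2 = 1 ∧ PySem.List.pyGet? cur_sec_score (-1) = some '-' then
        new_score ++ (PySem.List.slice cur_sec_score none (some (-1)) ++ ['\n'])
      else new_score ++ cur_sec_score)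
    (fun acc p => acc ++ pvSectionB sep p) []
    (fun acc p _ => pvBody_eq sep acc p)
  rw [h1, PySem.List.foldl_append_eq_flatMap]
  simp [List.flatMap_def]

-- ===== VERDICT (by name: the statement is the Claim_ definition above) =====
theorem format_sectioned_score_spec : Claim_equal_format_sectioned_score := by
  intro score sep _ _
  show format_sectioned_score score sep = format_sectioned_score_alt score sep
  exact congrArg String.mk (pvOuter_eq sep.toList
    (PySem.List.enumerate (PySem.Chars.splitOn
      (PySem.Chars.replace (PySem.Chars.replace score.toList ['\n'] []) [' '] ['-']) ['/']) 0))
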